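-- pv_equiv track=rewrite | github.com/temp1982chaitanya/rmz01_cgpt | backend/card_utils.py | is_pure_sequence
-- ===== SOURCE A (Python) =====
-- def rank_to_value(rank: str) -> int:
--     """Convert card rank to numeric value"""
--     table = {'A': 1, '2': 2, '3': 3, '4': 4, '5': 5, '6': 6, '7': 7,
--              '8': 8, '9': 9, '10': 10, 'J': 11, 'Q': 12, 'K': 13}
--     return table.get(rank, 0)
--
-- def is_pure_sequence(meld: list[str]) -> bool:
--     """Check if meld is a pure sequence (no jokers)"""
--     if len(meld) < 3:
--         return False
--
--     # Extract suits and ranks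
--     suits = [card[-1] for card in meld]
--     ranks = [card[:-1] for card in meld]
--
--     # All cards must be same suit
--     if len(set(suits)) != 1:
--         return False
--
--     # Convert ranks to numbers for sequence check
--     rank_values = []
--     for rank in ranks:
--         rank_values.append(rank_to_value(rank))
--
--     # Check if consecutive
--     rank_values.sort()
--     for i in range(1, len(rank_values)):
--         if rank_values[i] != rank_values[i-1] + 1:
--             return False
--
--     return True
-- ===== SOURCE B (Python) =====
-- def rank_to_value(rank: str) -> int:
--     """Convert card rank to numeric value"""
--     table = {'A': 1, '2': 2, '3': 3, '4': 4, '5': 5, '6': 6, '7': 7,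
--              '8': 8, '9': 9, '10': 10, 'J': 11, 'Q': 12, 'K': 13}
--     return table.get(rank, 0)
--
-- def is_pure_sequence(meld: list[str]) -> bool:
--     """Check if meld is a pure sequence (no jokers) -- sort-free:
--     consecutive iff values are all distinct and span exactly len-1."""
--     if len(meld) < 3:
--         return False
--     if len({card[-1] for card in meld}) != 1:
--         return False
--     vals = [rank_to_value(card[:-1]) for card in meld]
--     return len(set(vals)) == len(vals) and max(vals) - min(vals) == len(vals) - 1
-- ===== Notes on version B (the rewrite author's own statement) =====
-- stated objective: simpler
-- what changed: Replaced A's sort-then-adjacent-scan consecutiveness check by a sort-free test: the rank values form a sequence iff they are pairwise distinct and max-min equals len-1.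
import Mathlib
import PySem

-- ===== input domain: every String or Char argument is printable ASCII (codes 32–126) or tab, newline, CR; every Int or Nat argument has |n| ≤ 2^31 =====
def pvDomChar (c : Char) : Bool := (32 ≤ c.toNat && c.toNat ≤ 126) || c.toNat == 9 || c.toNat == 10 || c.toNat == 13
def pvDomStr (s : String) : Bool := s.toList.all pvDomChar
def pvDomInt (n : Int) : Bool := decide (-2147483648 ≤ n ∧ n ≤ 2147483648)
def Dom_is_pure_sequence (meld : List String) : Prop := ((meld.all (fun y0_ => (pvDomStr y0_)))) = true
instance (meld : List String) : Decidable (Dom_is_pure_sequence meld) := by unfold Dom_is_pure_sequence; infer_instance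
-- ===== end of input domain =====

-- B replaces A's sort-then-adjacent-scan consecutiveness check by a sort-free one (all rank values distinct and max-min = len-1); objective: simpler.

-- ===== PORT A =====
-- shared module helper: table.get(rank, 0)
def rank_to_value (rank : String) : Int :=
  let table : PySem.Dict String Int := PySem.Dict.ofList
    [("A", 1), ("2", 2), ("3", 3), ("4", 4), ("5", 5), ("6", 6), ("7", 7),
     ("8", 8), ("9", 9), ("10", 10), ("J", 11), ("Q", 12), ("K", 13)]
  table.getD rank 0

def is_pure_sequence (meld : List String) : Bool :=
  if meld.length < 3 then false
  else
    -- card[-1] raises IndexError on ""; such melds are excluded by Pre_, the ' ' default is never used there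
    let suits : List Char := meld.map (fun card => (PySem.Str.pyGet? card (-1)).getD ' ')
    let ranks : List String := meld.map (fun card => PySem.Str.slice card none (some (-1)))
    if (PySem.Set.ofList suits).length ≠ 1 then false
    else
      let rank_values : List Int := ranks.foldl (fun acc rank => acc ++ [rank_to_value rank]) []
      let sortedVals := PySem.List.sorted rank_values (fun x => x) false
      -- 'for i in range(1, n): if …: return False' then 'return True' — an all over the range
      (PySem.List.pyRange 1 (sortedVals.length : Int) 1).all
        (fun i => PySem.List.pyGetD sortedVals i 0 == PySem.List.pyGetD sortedVals (i - 1) 0 + 1)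

-- ===== PORT B =====
def is_pure_sequence_alt (meld : List String) : Bool :=
  if meld.length < 3 then false
  else if (PySem.Set.ofList (meld.map (fun card => (PySem.Str.pyGet? card (-1)).getD ' '))).length ≠ 1 then
    false
  else
    let vals : List Int := meld.map (fun card => rank_to_value (PySem.Str.slice card none (some (-1))))
    ((PySem.Set.ofList vals).length == vals.length)
      && ((PySem.List.max? vals (fun x => x)).getD 0 - (PySem.List.min? vals (fun x => x)).getD 0
            == (vals.length : Int) - 1)

-- ===== PRECONDITION & SPEC =====
-- Pre_ excludes melds of length ≥ 3 containing an empty card string, on which A (card[-1]) raises IndexError (B raises there too).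
def Pre_is_pure_sequence (meld : List String) : Prop := meld.length < 3 ∨ "" ∉ meld
instance (meld : List String) : Decidable (Pre_is_pure_sequence meld) := by
  unfold Pre_is_pure_sequence; infer_instance
def pvWitness_is_pure_sequence : List String := ["AS", "2S", "3S"]
def Spec_is_pure_sequence (meld : List String) (out : Bool) : Prop := out = is_pure_sequence_alt meld
instance (meld : List String) (out : Bool) : Decidable (Spec_is_pure_sequence meld out) := by
  unfold Spec_is_pure_sequence; infer_instance

-- ===== CLAIM (what is proved, stated in full; the proofs are below) =====
def Claim_equal_is_pure_sequence : Prop := ∀ (meld : List String), Dom_is_pure_sequence meld → Pre_is_pure_sequence meld → Spec_is_pure_sequence meld (is_pure_sequence meld)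

-- ===== LEMMAS AND PROOFS =====

-- len(set(xs)) == len(xs) iff xs has no duplicates
theorem pv_setlen_iff_nodup (xs : List Int) :
    (PySem.Set.ofList xs).length = xs.length ↔ xs.Nodup := by
  induction xs with
  | nil => simp [PySem.Set.ofList]
  | cons x xs ih =>
    rw [PySem.Set.ofList_cons]
    constructor
    · intro h
      have hlen := PySem.Set.length_ofList_le xs
      by_cases hx : x ∈ xs
      · exfalso
        have hxm : x ∈ PySem.Set.ofList xs := (PySem.Set.mem_ofList xs x).mpr hx
        have : ((PySem.Set.ofList xs).discard x).length < (PySem.Set.ofList xs).length := by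
          simp only [PySem.Set.discard]
          apply List.length_filter_lt_length_iff_exists.mpr
          exact ⟨x, hxm, by simp⟩
        simp at h; omega
      · have hfe : (PySem.Set.ofList xs).discard x = PySem.Set.ofList xs := by
          simp only [PySem.Set.discard]
          apply List.filter_eq_self.mpr
          intro y hy
          have : y ∈ xs := (PySem.Set.mem_ofList xs y).mp hy
          simp; rintro rfl; exact hx this
        rw [hfe] at h
        simp at h
        exact List.nodup_cons.mpr ⟨hx, ih.mp h⟩
    · intro h
      have := List.nodup_cons.mp h
      have hfe : (PySem.Set.ofList xs).discard x = PySem.Set.ofList xs := by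
        simp only [PySem.Set.discard]
        apply List.filter_eq_self.mpr
        intro y hy
        have : y ∈ xs := (PySem.Set.mem_ofList xs y).mp hy
        simp; rintro rfl; exact this.1 ‹y ∈ xs›
      rw [hfe]
      simp [ih.mpr this.2]

-- the index form, on List.range, of A's adjacent-pairs scan
theorem pv_natAll_iff_chain (s : List Int) :
    (((List.range (s.length - 1)).all
      (fun k => s.getD (k + 1) 0 == s.getD k 0 + 1)) = true)
    ↔ s.IsChain (fun a b => b = a + 1) := by
  induction s with
  | nil => simp
  | cons a t ih =>
    cases t with
    | nil => simp
    | cons b u =>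
      rw [List.isChain_cons_cons]
      have hr : List.range ((a :: b :: u).length - 1) = 0 :: (List.range ((b :: u).length - 1)).map Nat.succ := by
        simp [List.range_succ_eq_map]
      rw [hr]
      simp only [List.all_cons, List.all_map, Bool.and_eq_true]
      constructor
      · rintro ⟨h0, h1⟩
        refine ⟨by simpa using h0, ih.mp ?_⟩
        simpa [Function.comp] using h1
      · rintro ⟨h0, h1⟩
        refine ⟨by simpa using h0, ?_⟩
        simpa [Function.comp] using ih.mpr h1

-- A's loop over range(1, n) with xs[i], xs[i-1] is the adjacent +1 chain
theorem pv_rangeAll_iff_chain (s : List Int) :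
    (((PySem.List.pyRange 1 (s.length : Int) 1).all
      (fun i => PySem.List.pyGetD s i 0 == PySem.List.pyGetD s (i - 1) 0 + 1)) = true)
    ↔ s.IsChain (fun a b => b = a + 1) := by
  rw [← pv_natAll_iff_chain]
  rw [PySem.List.pyRange_one, List.all_map]
  have : ((s.length : Int) - 1).toNat = s.length - 1 := by omega
  rw [this]
  have heq := List.all_congr (rfl : List.range (s.length - 1) = List.range (s.length - 1))
    (p := (fun i => PySem.List.pyGetD s i 0 == PySem.List.pyGetD s (i - 1) 0 + 1) ∘ fun k => 1 + (k : Int))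
    (q := fun k => s.getD (k + 1) 0 == s.getD k 0 + 1) (fun k => by
      have h1 : (1 : Int) + (k : Int) = ((k + 1 : Nat) : Int) := by push_cast; ring
      have h2 : (1 : Int) + (k : Int) - 1 = ((k : Nat) : Int) := by omega
      show (PySem.List.pyGetD s (1 + (k : Int)) 0 == PySem.List.pyGetD s (1 + (k : Int) - 1) 0 + 1)
          = (s.getD (k + 1) 0 == s.getD k 0 + 1)
      rw [h2, h1, PySem.List.pyGetD_natCast, PySem.List.pyGetD_natCast])
  rw [heq]

-- in a ≤-pairwise list the head is a lower bound …
theorem pv_head_le (a : Int) (t : List Int) (h : (a :: t).Pairwise (· ≤ ·)) :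
    ∀ x ∈ a :: t, a ≤ x := by
  intro x hx
  rcases List.mem_cons.mp hx with rfl | hx
  · exact le_refl x
  · exact (List.pairwise_cons.mp h).1 x hx

-- … and the last element an upper bound
theorem pv_le_last (t : List Int) : ∀ (a : Int), (a :: t).Pairwise (· ≤ ·) →
    ∀ x ∈ a :: t, x ≤ (a :: t).getLast?.getD 0 := by
  induction t with
  | nil => intro a _ x hx; simp_all
  | cons b u ih =>
    intro a h x hx
    have h' : (b :: u).Pairwise (· ≤ ·) := (List.pairwise_cons.mp h).2
    rw [List.getLast?_cons_cons]
    rcases List.mem_cons.mp hx with rfl | hx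
    · calc x ≤ b := (List.pairwise_cons.mp h).1 b (by simp)
        _ ≤ (b :: u).getLast?.getD 0 := ih b h' b (by simp)
    · exact ih b h' x hx

-- a strictly increasing list spans at least its length
theorem pv_lastlb (t : List Int) : ∀ (a : Int), (a :: t).Pairwise (· < ·) →
    a + t.length ≤ (a :: t).getLast?.getD 0 := by
  induction t with
  | nil => intro a _; simp
  | cons b u ih =>
    intro a h
    have hab : a < b := (List.pairwise_cons.mp h).1 b (by simp)
    have h' : (b :: u).Pairwise (· < ·) := (List.pairwise_cons.mp h).2
    have := ih b h'
    rw [List.getLast?_cons_cons]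
    simp only [List.length_cons]
    push_cast
    omega

-- core: a ≤-sorted nonempty list is an adjacent +1 chain iff it is duplicate-free and spans len-1
theorem pv_chain_iff (s : List Int) : s.Pairwise (· ≤ ·) → s ≠ [] →
    (s.IsChain (fun a b => b = a + 1)
    ↔ (s.Nodup ∧ s.getLast?.getD 0 = s.head?.getD 0 + s.length - 1)) := by
  induction s with
  | nil => intro _ h; exact absurd rfl h
  | cons a t ih =>
    intro hs _
    cases t with
    | nil => simp
    | cons b u =>
      have h' : (b :: u).Pairwise (· ≤ ·) := (List.pairwise_cons.mp hs).2
      have hab : a ≤ b := (List.pairwise_cons.mp hs).1 b (by simp)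
      have iht := ih h' (by simp)
      rw [List.isChain_cons_cons, List.getLast?_cons_cons]
      constructor
      · rintro ⟨rfl, hch⟩
        obtain ⟨hnd, hlast⟩ := iht.mp hch
        refine ⟨List.nodup_cons.mpr ⟨?_, hnd⟩, ?_⟩
        · intro hmem
          have := pv_head_le (a + 1) u h' a hmem
          omega
        · simp only [List.head?_cons, Option.getD_some, List.length_cons] at *
          push_cast at *
          omega
      · rintro ⟨hnd, hlast⟩
        obtain ⟨hnotmem, hnd'⟩ := List.nodup_cons.mp hnd
        have hlt : (b :: u).Pairwise (· < ·) := by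
          have := List.Pairwise.and h' hnd'
          exact this.imp (fun {x y} ⟨hle, hne⟩ => lt_of_le_of_ne hle hne)
        have hlb := pv_lastlb u b hlt
        have hba : b = a + 1 := by
          have hane : a ≠ b := fun hh => hnotmem (hh ▸ List.mem_cons_self ..)
          simp only [List.head?_cons, Option.getD_some, List.length_cons] at hlast
          push_cast at hlast hlb
          omega
        refine ⟨hba.symm ▸ rfl, iht.mpr ⟨hnd', ?_⟩⟩
        simp only [List.head?_cons, Option.getD_some, List.length_cons] at *
        push_cast at *
        omega

-- max(vals) is the last element of any ≤-sorted rearrangement of vals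
theorem pv_max_eq_last_gen (vals : List Int) (s : List Int) (hperm : s.Perm vals)
    (hpw : s.Pairwise (· ≤ ·)) (hne : vals ≠ []) :
    (PySem.List.max? vals (fun x => x)).getD 0 = s.getLast?.getD 0 := by
  have hsne : s ≠ [] := fun h => hne (List.Perm.eq_nil (h ▸ hperm.symm))
  obtain ⟨m, hm⟩ : ∃ m, PySem.List.max? vals (fun x => x) = some m := by
    cases hmx : PySem.List.max? vals (fun x => x) with
    | none => exact absurd ((PySem.List.max?_eq_none_iff vals _).mp hmx) hne
    | some m => exact ⟨m, rfl⟩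
  cases s with
  | nil => exact absurd rfl hsne
  | cons a t =>
    rw [hm]
    have hL : (a :: t).getLast?.getD 0 ∈ a :: t := by
      rw [List.getLast?_eq_getLast (l := a :: t) (by simp), Option.getD_some]
      exact List.getLast_mem _
    apply le_antisymm
    · exact pv_le_last t a hpw m (hperm.mem_iff.mpr (PySem.List.max?_mem hm))
    · exact PySem.List.max?_isMax hm _ (hperm.mem_iff.mp hL)

-- min(vals) is the head of any ≤-sorted rearrangement of vals
theorem pv_min_eq_head_gen (vals : List Int) (s : List Int) (hperm : s.Perm vals)
    (hpw : s.Pairwise (· ≤ ·)) (hne : vals ≠ []) :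
    (PySem.List.min? vals (fun x => x)).getD 0 = s.head?.getD 0 := by
  have hsne : s ≠ [] := fun h => hne (List.Perm.eq_nil (h ▸ hperm.symm))
  obtain ⟨m, hm⟩ : ∃ m, PySem.List.min? vals (fun x => x) = some m := by
    cases hmx : PySem.List.min? vals (fun x => x) with
    | none => exact absurd ((PySem.List.min?_eq_none_iff vals _).mp hmx) hne
    | some m => exact ⟨m, rfl⟩
  cases s with
  | nil => exact absurd rfl hsne
  | cons a t =>
    rw [hm]
    simp only [List.head?_cons, Option.getD_some]
    apply le_antisymm
    · exact PySem.List.min?_isMin hm a (hperm.mem_iff.mp (by simp))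
    · exact pv_head_le a t hpw m (hperm.mem_iff.mpr (PySem.List.min?_mem hm))

-- the heart of the equivalence, stated on the computed value list
theorem pv_core (vals : List Int) (hne : vals ≠ []) :
    ((PySem.List.pyRange 1 ((PySem.List.sorted vals (fun x => x) false).length : Int) 1).all
      (fun i => PySem.List.pyGetD (PySem.List.sorted vals (fun x => x) false) i 0 ==
                PySem.List.pyGetD (PySem.List.sorted vals (fun x => x) false) (i - 1) 0 + 1))
   = (((PySem.Set.ofList vals).length == vals.length)
      && ((PySem.List.max? vals (fun x => x)).getD 0 - (PySem.List.min? vals (fun x => x)).getD 0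
            == (vals.length : Int) - 1)) := by
  have hperm := PySem.List.sorted_perm vals (fun x => x) false
  have hpw := PySem.List.sorted_pairwise vals (fun x => x)
  have hsne : PySem.List.sorted vals (fun x => x) false ≠ [] :=
    fun h => hne (List.Perm.eq_nil (h ▸ hperm.symm))
  rw [Bool.eq_iff_iff]
  rw [pv_rangeAll_iff_chain, pv_chain_iff _ hpw hsne]
  rw [pv_max_eq_last_gen vals _ hperm hpw hne, pv_min_eq_head_gen vals _ hperm hpw hne]
  rw [Bool.and_eq_true, beq_iff_eq, beq_iff_eq, pv_setlen_iff_nodup, hperm.nodup_iff,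
    hperm.length_eq]
  constructor
  · rintro ⟨h1, h2⟩; exact ⟨h1, by omega⟩
  · rintro ⟨h1, h2⟩; exact ⟨h1, by omega⟩

-- ===== VERDICT (by name: the statement is the Claim_ definition above) =====
theorem is_pure_sequence_spec : Claim_equal_is_pure_sequence := by
  intro meld _ _
  unfold Spec_is_pure_sequence
  unfold is_pure_sequence is_pure_sequence_alt
  by_cases h3 : meld.length < 3
  · simp [h3]
  · simp only [h3, if_false]
    set suits := meld.map (fun card => (PySem.Str.pyGet? card (-1)).getD ' ') with hsuits
    by_cases hg : (PySem.Set.ofList suits).length ≠ 1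
    · simp [hg]
    · simp only [hg, if_false]
      rw [PySem.List.foldl_append_singleton_eq_map, List.nil_append, List.map_map]
      have hne : meld.map (fun card => rank_to_value (PySem.Str.slice card none (some (-1)))) ≠ [] := by
        intro h
        rw [List.map_eq_nil_iff] at h
        subst h
        simp at h3
      simpa using pv_core _ hne
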